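-- pv_equiv track=rewrite | github.com/sunilsoni/interview-notes-python | com/interview/2024/march/test1/get_request_status2.py | getRequestStatus
-- ===== SOURCE A (Python) =====
-- import collections
--
-- def getRequestStatus(requests):
--     domain_counts = collections.defaultdict(collections.deque)
--
--     def check_limits(domain):
--         count_5s = 0
--         count_30s = 0
--         for timestamp in domain_counts[domain]:
--             if timestamp >= i - 5:
--                 count_5s += 1
--             if timestamp >= i - 30:
--                 count_30s += 1
--         return count_5s < 2 and count_30s < 5
--
--     result = []
--     for i, domain in enumerate(requests):
--         if check_limits(domain):
--             domain_counts[domain].append(i)  # Update timestamps for accepted requests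
--             result.append("{status: 200, message: OK}")
--         else:
--             result.append("{status: 429, message: Too many requests}")
--
--     return result
-- ===== SOURCE B (Python) =====
-- import collections
--
-- def getRequestStatus(requests):
--     # Sliding window per domain: prune timestamps older than i - 30 from the
--     # front, so each window holds at most 5 entries and every step is O(1).
--     windows = collections.defaultdict(collections.deque)
--     result = []
--     for i, domain in enumerate(requests):
--         dq = windows[domain]
--         while dq and dq[0] < i - 30:
--             dq.popleft()
--         recent5 = sum(1 for t in dq if t >= i - 5)
--         if recent5 < 2 and len(dq) < 5:
--             dq.append(i)
--             result.append("{status: 200, message: OK}")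
--         else:
--             result.append("{status: 429, message: Too many requests}")
--     return result
-- ===== Notes on version B (the rewrite author's own statement) =====
-- stated objective: faster
-- what changed: A rescans the full unbounded per-domain timestamp history at every request; B keeps a per-domain sliding-window deque, pruning timestamps older than i-30 from the front, so each window holds at most 5 entries and the whole run is linear.
import Mathlib
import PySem

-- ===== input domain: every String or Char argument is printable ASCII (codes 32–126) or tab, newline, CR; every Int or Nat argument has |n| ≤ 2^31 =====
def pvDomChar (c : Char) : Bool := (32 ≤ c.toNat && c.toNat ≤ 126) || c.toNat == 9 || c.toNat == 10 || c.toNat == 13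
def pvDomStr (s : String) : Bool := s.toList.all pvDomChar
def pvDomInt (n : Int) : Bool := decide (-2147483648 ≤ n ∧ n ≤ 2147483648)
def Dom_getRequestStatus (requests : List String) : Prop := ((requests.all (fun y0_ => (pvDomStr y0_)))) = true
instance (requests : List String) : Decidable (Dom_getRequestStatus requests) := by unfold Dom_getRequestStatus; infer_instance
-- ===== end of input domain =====

-- B replaces A's full-history rescan per request by a per-domain sliding window
-- pruned at the front (timestamps < i - 30 dropped); objective: faster.

-- ===== PORT A =====
-- check_limits: one pass over the domain's full timestamp list, two counters
def aCount (i : Int) (lst : List Int) : Nat × Nat :=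
  lst.foldl (fun c t =>
    ((if i - 5 ≤ t then c.1 + 1 else c.1), (if i - 30 ≤ t then c.2 + 1 else c.2))) (0, 0)

def aLoop (d : PySem.Dict String (List Int)) (i : Int) (rs : List String) : List String :=
  match rs with
  | [] => []
  | dom :: rest =>
    let lst := d.getD dom []
    let c := aCount i lst
    if c.1 < 2 ∧ c.2 < 5 then
      "{status: 200, message: OK}" :: aLoop (d.insert dom (lst ++ [i])) (i + 1) rest
    else
      "{status: 429, message: Too many requests}" :: aLoop d (i + 1) rest

def getRequestStatus (requests : List String) : List String :=
  aLoop PySem.Dict.empty 0 requests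

-- ===== PORT B =====
def bLoop (d : PySem.Dict String (List Int)) (i : Int) (rs : List String) : List String :=
  match rs with
  | [] => []
  | dom :: rest =>
    -- while dq and dq[0] < i - 30: dq.popleft()
    let pruned := (d.getD dom []).dropWhile (fun t => decide (t < i - 30))
    let recent5 := pruned.countP (fun t => decide (i - 5 ≤ t))
    if recent5 < 2 ∧ pruned.length < 5 then
      "{status: 200, message: OK}" :: bLoop (d.insert dom (pruned ++ [i])) (i + 1) rest
    else
      "{status: 429, message: Too many requests}" :: bLoop (d.insert dom pruned) (i + 1) rest

def getRequestStatus_alt (requests : List String) : List String :=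
  bLoop PySem.Dict.empty 0 requests

-- ===== PRECONDITION & SPEC =====
def Spec_getRequestStatus (requests : List String) (out : List String) : Prop := out = getRequestStatus_alt requests
instance (requests : List String) (out : List String) : Decidable (Spec_getRequestStatus requests out) := by unfold Spec_getRequestStatus; infer_instance

-- ===== CLAIM (what is proved, stated in full; the proofs are below) =====
def Claim_equal_getRequestStatus : Prop := ∀ (requests : List String), Dom_getRequestStatus requests → Spec_getRequestStatus requests (getRequestStatus requests)

-- ===== LEMMAS AND PROOFS =====

-- Invariant: A's dict keeps each domain's full accepted history; B's keeps a
-- suffix of it, the dropped prefix being stale (< i - 30), sorted and < i.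
def RLInv (i : Int) (dA dB : PySem.Dict String (List Int)) : Prop :=
  ∀ dom : String,
    (∃ junk, dA.getD dom [] = junk ++ dB.getD dom [] ∧ ∀ t ∈ junk, t < i - 30)
    ∧ (dB.getD dom []).Pairwise (· < ·)
    ∧ ∀ t ∈ dB.getD dom [], t < i

lemma aCount_fold (i : Int) (l : List Int) (a b : Nat) :
    l.foldl (fun c t =>
      ((if i - 5 ≤ t then c.1 + 1 else c.1), (if i - 30 ≤ t then c.2 + 1 else c.2))) (a, b)
    = (a + l.countP (fun t => decide (i - 5 ≤ t)), b + l.countP (fun t => decide (i - 30 ≤ t))) := by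
  induction l generalizing a b with
  | nil => simp
  | cons x l ih =>
    simp only [List.foldl_cons, List.countP_cons, ih]
    by_cases h5 : i - 5 ≤ x <;> by_cases h30 : i - 30 ≤ x <;>
      simp [h5, h30] <;> omega

lemma aCount_eq (i : Int) (l : List Int) :
    aCount i l = (l.countP (fun t => decide (i - 5 ≤ t)), l.countP (fun t => decide (i - 30 ≤ t))) := by
  simpa [aCount] using aCount_fold i l 0 0

lemma mem_dropWhile_ge (c : Int) (l : List Int) (h : l.Pairwise (· < ·)) :
    ∀ t ∈ l.dropWhile (fun t => decide (t < c)), c ≤ t := by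
  induction l with
  | nil => simp
  | cons a l ih =>
    intro t ht
    rcases List.pairwise_cons.mp h with ⟨ha, hl⟩
    by_cases hac : a < c
    · simp only [List.dropWhile_cons, hac, decide_true] at ht
      exact ih hl t ht
    · simp only [List.dropWhile_cons, hac, decide_false] at ht
      rcases List.mem_cons.mp ht with rfl | ht
      · omega
      · have := ha t ht; omega

lemma loop_eq (rs : List String) :
    ∀ (i : Int) (dA dB : PySem.Dict String (List Int)), RLInv i dA dB →
      aLoop dA i rs = bLoop dB i rs := by
  induction rs with
  | nil => intro i dA dB _; rfl
  | cons dom rest ih =>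
    intro i dA dB hInv
    obtain ⟨⟨junk, hsplit, hjunk⟩, hsorted, hbound⟩ := hInv dom
    set lA := dA.getD dom [] with hlA
    set lB := dB.getD dom [] with hlB
    set pruned := lB.dropWhile (fun t => decide (t < i - 30)) with hpr
    set dropped := lB.takeWhile (fun t => decide (t < i - 30)) with hdr
    have hBsplit : lB = dropped ++ pruned := (List.takeWhile_append_dropWhile).symm
    have hdropped : ∀ t ∈ dropped, t < i - 30 := by
      intro t ht
      simpa using List.mem_takeWhile_imp ht
    have hprmem : ∀ t ∈ pruned, t ∈ lB := fun t ht => (List.dropWhile_sublist _).mem ht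
    have hprge : ∀ t ∈ pruned, i - 30 ≤ t := mem_dropWhile_ge _ _ hsorted
    have hprlt : ∀ t ∈ pruned, t < i := fun t ht => hbound t (hprmem t ht)
    have hprsorted : pruned.Pairwise (· < ·) := hsorted.sublist (List.dropWhile_sublist _)
    -- count equalities over A's full list vs B's pruned window
    have hc5 : lA.countP (fun t => decide (i - 5 ≤ t)) = pruned.countP (fun t => decide (i - 5 ≤ t)) := by
      rw [hsplit, hBsplit, List.countP_append, List.countP_append]
      have hj : junk.countP (fun t => decide (i - 5 ≤ t)) = 0 :=
        List.countP_eq_zero.mpr (fun t ht => by have := hjunk t ht; simp; omega)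
      have hd : dropped.countP (fun t => decide (i - 5 ≤ t)) = 0 :=
        List.countP_eq_zero.mpr (fun t ht => by have := hdropped t ht; simp; omega)
      omega
    have hc30 : lA.countP (fun t => decide (i - 30 ≤ t)) = pruned.length := by
      rw [hsplit, hBsplit, List.countP_append, List.countP_append]
      have hj : junk.countP (fun t => decide (i - 30 ≤ t)) = 0 :=
        List.countP_eq_zero.mpr (fun t ht => by have := hjunk t ht; simp; omega)
      have hd : dropped.countP (fun t => decide (i - 30 ≤ t)) = 0 :=
        List.countP_eq_zero.mpr (fun t ht => by have := hdropped t ht; simp; omega)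
      have hp : pruned.countP (fun t => decide (i - 30 ≤ t)) = pruned.length :=
        List.countP_eq_length.mpr (fun t ht => by simpa using hprge t ht)
      omega
    have hdec : ((aCount i lA).1 < 2 ∧ (aCount i lA).2 < 5)
        ↔ (pruned.countP (fun t => decide (i - 5 ≤ t)) < 2 ∧ pruned.length < 5) := by
      rw [aCount_eq, hc5, hc30]
    -- invariant preservation for an untouched domain (i grows by one)
    have hmono : ∀ (dom' : String) (dA' dB' : PySem.Dict String (List Int)),
        dA'.getD dom' [] = dA.getD dom' [] → dB'.getD dom' [] = dB.getD dom' [] →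
        (∃ j, dA'.getD dom' [] = j ++ dB'.getD dom' [] ∧ ∀ t ∈ j, t < (i + 1) - 30)
          ∧ (dB'.getD dom' []).Pairwise (· < ·) ∧ ∀ t ∈ dB'.getD dom' [], t < i + 1 := by
      intro dom' dA' dB' hA hB
      obtain ⟨⟨j, hs, hj⟩, hsort, hb⟩ := hInv dom'
      rw [hA, hB]
      exact ⟨⟨j, hs, fun t ht => by have := hj t ht; omega⟩, hsort,
        fun t ht => by have := hb t ht; omega⟩
    -- invariant preservation for the touched domain
    have hjunk' : ∀ t ∈ junk ++ dropped, t < (i + 1) - 30 := by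
      intro t ht
      rcases List.mem_append.mp ht with ht | ht
      · have := hjunk t ht; omega
      · have := hdropped t ht; omega
    have hsplit' : lA = (junk ++ dropped) ++ pruned := by
      rw [hsplit, hBsplit, List.append_assoc]
    have hprlt' : ∀ t ∈ pruned, t < i + 1 := fun t ht => by have := hprlt t ht; omega
    have hInvAcc : RLInv (i + 1) (dA.insert dom (lA ++ [i])) (dB.insert dom (pruned ++ [i])) := by
      intro dom'
      by_cases hdq : dom' = dom
      · subst hdq
        simp only [PySem.Dict.getD_insert, if_true]
        refine ⟨⟨junk ++ dropped, by simp [hsplit'], hjunk'⟩, ?_, ?_⟩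
        · refine List.pairwise_append.mpr ⟨hprsorted, by simp, ?_⟩
          intro a ha b hb
          simp only [List.mem_singleton] at hb; subst hb
          exact hprlt a ha
        · intro t ht
          rcases List.mem_append.mp ht with ht | ht
          · exact hprlt' t ht
          · simp only [List.mem_singleton] at ht; omega
      · exact hmono dom' _ _
          (by simp [PySem.Dict.getD_insert, hdq])
          (by simp [PySem.Dict.getD_insert, hdq])
    have hInvRej : RLInv (i + 1) dA (dB.insert dom pruned) := by
      intro dom'
      by_cases hdq : dom' = dom
      · subst hdq
        simp only [PySem.Dict.getD_insert, if_true]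
        exact ⟨⟨junk ++ dropped, hsplit', hjunk'⟩, hprsorted, hprlt'⟩
      · exact hmono dom' _ _ rfl (by simp [PySem.Dict.getD_insert, hdq])
    -- step
    show (let lst := dA.getD dom []; let c := aCount i lst;
          if c.1 < 2 ∧ c.2 < 5 then
            "{status: 200, message: OK}" :: aLoop (dA.insert dom (lst ++ [i])) (i + 1) rest
          else
            "{status: 429, message: Too many requests}" :: aLoop dA (i + 1) rest) = _
    simp only [bLoop, ← hlA, ← hlB, ← hpr]
    by_cases hok : (aCount i lA).1 < 2 ∧ (aCount i lA).2 < 5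
    · rw [if_pos hok, if_pos (hdec.mp hok)]
      exact congrArg _ (ih (i + 1) _ _ hInvAcc)
    · rw [if_neg hok, if_neg (fun h => hok (hdec.mpr h))]
      exact congrArg _ (ih (i + 1) _ _ hInvRej)

lemma inv_init : RLInv 0 PySem.Dict.empty PySem.Dict.empty := by
  intro dom
  simp [PySem.Dict.getD_empty]

-- ===== VERDICT (by name: the statement is the Claim_ definition above) =====
theorem getRequestStatus_spec : Claim_equal_getRequestStatus := by
  intro requests _
  show getRequestStatus requests = getRequestStatus_alt requests
  exact loop_eq requests 0 _ _ inv_init
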